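-- pv_equiv track=rewrite | github.com/appleml/EventGenerationSpan | process_data/data_utils.py | compute_trigname_same_num
-- ===== SOURCE A (Python) =====
-- def compute_trigname_same_num(str_trig_set):
--     trig_name_set = []
--     for str_trig in str_trig_set:
--         trig_info = str_trig.split()
--         trig_name = " ".join(trig_info[8:])
--
--         if trig_name not in trig_name_set:
--             trig_name_set.append(trig_name)
--         else:
--             return True
--     return False
-- ===== SOURCE B (Python) =====
-- def compute_trigname_same_num(str_trig_set):
--     names = [" ".join(s.split()[8:]) for s in str_trig_set]
--     return len(names) != len(set(names))
-- ===== Notes on version B (the rewrite author's own statement) =====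
-- stated objective: simpler
-- what changed: Replaced the incremental seen-list with per-element membership probing and early return by building the full list of trigger names in one pass and deciding duplication via a set-cardinality comparison (len(names) != len(set(names))).
import Mathlib
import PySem

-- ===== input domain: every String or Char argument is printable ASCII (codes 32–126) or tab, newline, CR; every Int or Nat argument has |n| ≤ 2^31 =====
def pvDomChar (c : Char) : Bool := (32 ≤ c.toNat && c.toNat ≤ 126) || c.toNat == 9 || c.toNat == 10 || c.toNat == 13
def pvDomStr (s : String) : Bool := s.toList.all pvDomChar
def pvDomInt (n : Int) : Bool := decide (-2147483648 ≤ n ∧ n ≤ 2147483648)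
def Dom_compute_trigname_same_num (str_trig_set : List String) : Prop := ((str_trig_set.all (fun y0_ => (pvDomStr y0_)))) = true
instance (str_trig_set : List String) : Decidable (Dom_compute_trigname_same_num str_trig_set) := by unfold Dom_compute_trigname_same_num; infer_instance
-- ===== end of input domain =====

-- B replaces A's incremental seen-list with early return by one name-list pass and a set-cardinality comparison (simpler; same values).
-- ===== PORT A =====
-- shared name extraction: " ".join(str_trig.split()[8:])
def pvName (s : String) : String :=
  PySem.Str.join " " (PySem.List.slice (PySem.Str.split₀ s) (some 8) none)

def pvGoA : List String → List String → Bool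
  | [], _ => false
  | str_trig :: rest, trig_name_set =>
    let trig_name := pvName str_trig
    if ¬ trig_name_set.contains trig_name then
      pvGoA rest (trig_name_set ++ [trig_name])
    else
      true

def compute_trigname_same_num (str_trig_set : List String) : Bool :=
  pvGoA str_trig_set []

-- ===== PORT B =====
def compute_trigname_same_num_alt (str_trig_set : List String) : Bool :=
  let names := str_trig_set.map pvName
  names.length != (PySem.Set.ofList names).length

-- ===== PRECONDITION & SPEC =====
def Spec_compute_trigname_same_num (str_trig_set : List String) (out : Bool) : Prop := out = compute_trigname_same_num_alt str_trig_set
instance (str_trig_set : List String) (out : Bool) : Decidable (Spec_compute_trigname_same_num str_trig_set out) := by unfold Spec_compute_trigname_same_num; infer_instance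

-- ===== CLAIM (what is proved, stated in full; the proofs are below) =====
def Claim_equal_compute_trigname_same_num : Prop := ∀ (str_trig_set : List String), Dom_compute_trigname_same_num str_trig_set → Spec_compute_trigname_same_num str_trig_set (compute_trigname_same_num str_trig_set)

-- ===== LEMMAS AND PROOFS =====

-- ===== VERDICT (by name: the statement is the Claim_ definition above) =====
lemma pv_len_ofList_iff {α : Type} [BEq α] [LawfulBEq α] (xs : List α) :
    ((PySem.Set.ofList xs).length = xs.length) ↔ xs.Nodup := by
  induction xs with
  | nil => simp
  | cons x xs ih =>
    rw [PySem.Set.ofList_cons]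
    by_cases hx : x ∈ xs
    · have hx' : x ∈ PySem.Set.ofList xs := (PySem.Set.mem_ofList xs x).2 hx
      constructor
      · intro h
        exfalso
        have h1 : ((PySem.Set.ofList xs).discard x).length < (PySem.Set.ofList xs).length := by
          unfold PySem.Set.discard
          apply List.length_filter_lt_length_iff_exists.2
          refine ⟨x, hx', ?_⟩
          simp
        have h2 := PySem.Set.length_ofList_le xs
        have h' : ((PySem.Set.ofList xs).discard x).length = xs.length := by
          simpa using h
        omega

      · intro h; exact absurd hx ((List.nodup_cons.1 h).1)
    · have hx' : x ∉ PySem.Set.ofList xs := fun h => hx ((PySem.Set.mem_ofList xs x).1 h)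
      have hd : (PySem.Set.ofList xs).discard x = PySem.Set.ofList xs := by
        unfold PySem.Set.discard
        apply List.filter_eq_self.2
        intro a ha
        have hax : a ≠ x := fun e => hx' (e ▸ ha)
        simp [hax]
      rw [hd]
      simp only [List.length_cons, List.nodup_cons]
      constructor
      · intro h; exact ⟨hx, ih.1 (by omega)⟩
      · intro ⟨_, h⟩
        have := ih.2 h
        omega

lemma pvGoA_eq (l : List String) (seen : List String) (h : seen.Nodup) :
    pvGoA l seen = !decide ((seen ++ l.map pvName).Nodup) := by
  induction l generalizing seen with
  | nil => simp [pvGoA, h]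
  | cons s rest ih =>
    simp only [pvGoA, List.map_cons]
    by_cases hc : pvName s ∈ seen
    · have : seen.contains (pvName s) = true := List.contains_iff_mem.2 hc
      simp only [this]
      have : ¬ (seen ++ pvName s :: rest.map pvName).Nodup := by
        intro hn
        have := List.disjoint_of_nodup_append hn
        exact this hc (by simp)
      simp [this]
    · have hcc : seen.contains (pvName s) = false := by
        simp [hc]
      simp only [hcc]
      have hseen' : (seen ++ [pvName s]).Nodup := by
        rw [List.nodup_append]
        refine ⟨h, List.nodup_singleton _, ?_⟩
        intro a ha b hb
        rw [List.mem_singleton] at hb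
        exact fun e => hc ((hb ▸ e) ▸ ha)
      rw [if_pos (by simp), ih _ hseen']
      congr 1
      rw [List.append_assoc]
      rfl

theorem compute_trigname_same_num_spec : Claim_equal_compute_trigname_same_num := by
  intro l _
  unfold Spec_compute_trigname_same_num compute_trigname_same_num compute_trigname_same_num_alt
  rw [pvGoA_eq l [] List.nodup_nil]
  simp only [List.nil_append]
  rcases Decidable.em ((l.map pvName).Nodup) with h | h
  · have := (pv_len_ofList_iff (l.map pvName)).2 h
    simp [h, this, bne]
  · have hne : (PySem.Set.ofList (l.map pvName)).length ≠ (l.map pvName).length :=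
      fun he => h ((pv_len_ofList_iff _).1 he)
    simp only [h, decide_false, Bool.not_false]
    exact Eq.symm (bne_iff_ne.2 (Ne.symm hne))
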